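-- pv_equiv track=rewrite | github.com/ricbit/advent-of-code | 2019/adv10-r.py | get_station
-- ===== SOURCE A (Python) =====
-- def get_station(asteroids, colinear):
--   blocked_sight = {a: 0 for a in asteroids}
--   for line in colinear.values():
--     for i, v in enumerate(sorted(line)):
--       blocked_sight[v] += len(range(0, i - 1)) + len(range(i + 2, len(line)))
--   max_detected = len(asteroids) - min(blocked_sight.values()) - 1
--   station = min(blocked_sight.keys(), key=lambda x: blocked_sight[x])
--   return max_detected, station
-- ===== SOURCE B (Python) =====
-- def get_station(asteroids, colinear):
--   blocked = dict.fromkeys(asteroids, 0)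
--   for line in colinear.values():
--     if line:
--       base = len(line) - 3
--       for v in line:
--         blocked[v] += base
--       blocked[min(line)] += 1
--       blocked[max(line)] += 1
--   best = None
--   for a, b in blocked.items():
--     if best is None or b < best[0]:
--       best = (b, a)
--   return len(asteroids) - best[0] - 1, best[1]
-- ===== Notes on version B (the rewrite author's own statement) =====
-- stated objective: alternative
-- what changed: B never sorts or ranks: each line contributes len(line)-3 to every member plus one extra to the line's min and max (the same totals A derives from ranks in sorted(line)), and the station is picked in a single running-best scan over blocked.items() instead of A's two separate min passes over values() and keys().
import Mathlib
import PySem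

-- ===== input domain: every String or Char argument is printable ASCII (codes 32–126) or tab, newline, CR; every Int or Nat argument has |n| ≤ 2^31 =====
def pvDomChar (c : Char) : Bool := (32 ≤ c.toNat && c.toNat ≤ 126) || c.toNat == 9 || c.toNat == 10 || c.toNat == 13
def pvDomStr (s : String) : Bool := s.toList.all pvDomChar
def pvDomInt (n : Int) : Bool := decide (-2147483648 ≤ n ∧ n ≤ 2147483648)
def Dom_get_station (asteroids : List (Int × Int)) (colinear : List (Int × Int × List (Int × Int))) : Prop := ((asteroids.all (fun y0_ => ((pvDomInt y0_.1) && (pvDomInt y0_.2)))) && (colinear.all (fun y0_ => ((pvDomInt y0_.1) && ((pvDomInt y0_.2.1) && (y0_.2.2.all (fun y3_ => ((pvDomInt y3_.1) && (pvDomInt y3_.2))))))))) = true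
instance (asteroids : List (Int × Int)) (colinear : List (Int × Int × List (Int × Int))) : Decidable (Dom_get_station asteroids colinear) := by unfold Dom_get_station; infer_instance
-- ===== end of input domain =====

-- B replaces A's sort-and-rank weights by a per-line min/max pass (len(line)-3 to every member,
-- +1 to the line's min and max) and picks the station in one running-best scan over blocked.items()
-- instead of A's two min passes; objective: an alternative, sort-free computation of the same result.

-- ===== PORT A =====
def get_station (asteroids : List (Int × Int)) (colinear : List (Int × Int × List (Int × Int))) : Int × (Int × Int) :=
  -- blocked_sight = {a: 0 for a in asteroids}
  let blocked_sight : PySem.Dict (Int × Int) Int :=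
    asteroids.foldl (fun d a => d.insert a 0) PySem.Dict.empty
  -- for line in colinear.values(): for i, v in enumerate(sorted(line)): blocked_sight[v] += len(range(0,i-1)) + len(range(i+2,len(line)))
  let blocked_sight :=
    (PySem.Dict.ofList (colinear.map (fun p => ((p.1, p.2.1), p.2.2)))).values.foldl (fun d line =>
      (PySem.List.enumerate (PySem.List.sorted2 line (fun x => x.1) (fun x => x.2)) 0).foldl
        (fun d p => d.modify p.2 0 (fun b => b +
          (((PySem.List.pyRange 0 (p.1 - 1) 1).length : Int) +
           ((PySem.List.pyRange (p.1 + 2) (line.length : Int) 1).length : Int)))) d)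
      blocked_sight
  -- max_detected = len(asteroids) - min(blocked_sight.values()) - 1
  let max_detected : Int :=
    (asteroids.length : Int) - ((PySem.List.min? blocked_sight.values (fun x => x)).getD 0) - 1
  -- station = min(blocked_sight.keys(), key=lambda x: blocked_sight[x])
  let station : Int × Int :=
    (PySem.List.min? blocked_sight.keys (fun x => blocked_sight.getD x 0)).getD (0, 0)
  (max_detected, station)

-- ===== PORT B =====
-- the loop body of the best-scan: if best is None or b < best[0]: best = (b, a)
def pvBestStep (best : Option (Int × (Int × Int))) (p : (Int × Int) × Int) :
    Option (Int × (Int × Int)) :=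
  match best with
  | none => some (p.2, p.1)
  | some (b0, s0) => if p.2 < b0 then some (p.2, p.1) else some (b0, s0)

def get_station_alt (asteroids : List (Int × Int)) (colinear : List (Int × Int × List (Int × Int))) : Int × (Int × Int) :=
  -- blocked = dict.fromkeys(asteroids, 0)
  let blocked : PySem.Dict (Int × Int) Int :=
    PySem.Dict.ofList ((PySem.List.dedup asteroids).map (fun a => (a, 0)))
  -- for line in colinear.values(): if line: base = len(line)-3; every member += base; min += 1; max += 1
  let blocked :=
    (PySem.Dict.ofList (colinear.map (fun p => ((p.1, p.2.1), p.2.2)))).values.foldl (fun d line =>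
      if line = [] then d
      else
        let base : Int := (line.length : Int) - 3
        let d := line.foldl (fun d v => d.modify v 0 (fun b => b + base)) d
        let d := match PySem.List.min2? line (fun x => x.1) (fun x => x.2) with
                 | some m => d.modify m 0 (fun b => b + 1)
                 | none => d
        match PySem.List.max2? line (fun x => x.1) (fun x => x.2) with
        | some m => d.modify m 0 (fun b => b + 1)
        | none => d)
      blocked
  -- best = None; for a, b in blocked.items(): if best is None or b < best[0]: best = (b, a)
  let best := blocked.items.foldl pvBestStep none
  -- return len(asteroids) - best[0] - 1, best[1]
  match best with
  | some (b0, s0) => ((asteroids.length : Int) - b0 - 1, s0)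
  | none => (0, (0, 0))  -- unreachable under Pre_ (asteroids ≠ []); Python raises TypeError here

-- ===== PRECONDITION & SPEC =====
-- Pre_ excludes exactly the inputs where Python A raises: ValueError (min of an empty dict) when
-- asteroids is empty, and KeyError when some colinear line mentions a point not in asteroids.
def Pre_get_station (asteroids : List (Int × Int)) (colinear : List (Int × Int × List (Int × Int))) : Prop :=
  asteroids ≠ [] ∧ ∀ p ∈ colinear, ∀ v ∈ p.2.2, v ∈ asteroids
instance (asteroids : List (Int × Int)) (colinear : List (Int × Int × List (Int × Int))) : Decidable (Pre_get_station asteroids colinear) := by unfold Pre_get_station; infer_instance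

def pvWitness_get_station : (List (Int × Int)) × (List (Int × Int × List (Int × Int))) :=
  ([(0, 0), (1, 1), (2, 2), (0, 1)], [(0, 0, [(0, 0), (1, 1), (2, 2)]), (9, 9, [(0, 1)])])

def Spec_get_station (asteroids : List (Int × Int)) (colinear : List (Int × Int × List (Int × Int))) (out : Int × (Int × Int)) : Prop := out = get_station_alt asteroids colinear
instance (asteroids : List (Int × Int)) (colinear : List (Int × Int × List (Int × Int))) (out : Int × (Int × Int)) : Decidable (Spec_get_station asteroids colinear out) := by unfold Spec_get_station; infer_instance

-- ===== CLAIM (what is proved, stated in full; the proofs are below) =====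
def Claim_equal_get_station : Prop := ∀ (asteroids : List (Int × Int)) (colinear : List (Int × Int × List (Int × Int))), Dom_get_station asteroids colinear → Pre_get_station asteroids colinear → Spec_get_station asteroids colinear (get_station asteroids colinear)

-- ===== LEMMAS AND PROOFS =====

-- the comparator of sorted2/min2?/max2? on pairs of Ints is the lexicographic order
theorem pvCmp_eq (a b : Int × Int) :
    (decide (a.1 < b.1) || (!decide (b.1 < a.1) && decide (a.2 < b.2))) = decide (toLex a < toLex b) := by
  by_cases h1 : a.1 < b.1 <;> by_cases h2 : b.1 < a.1 <;> by_cases h3 : a.2 < b.2 <;>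
    simp [h1, h2, h3, Prod.Lex.toLex_lt_toLex] <;> omega

theorem sorted2_eq_sorted_lex (line : List (Int × Int)) :
    PySem.List.sorted2 line (fun x => x.1) (fun x => x.2) =
      PySem.List.sorted line (fun x => toLex x) := by
  simp only [PySem.List.sorted2, PySem.List.sorted]
  congr 1
  funext acc x
  congr 1
  funext p q
  exact pvCmp_eq p q

theorem min2_eq_min_lex (line : List (Int × Int)) :
    PySem.List.min2? line (fun x => x.1) (fun x => x.2) =
      PySem.List.min? line (fun x => toLex x) := by
  simp only [PySem.List.min2?, PySem.List.min?]
  congr 1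
  funext acc x
  cases acc with
  | none => rfl
  | some m => dsimp only; rw [pvCmp_eq x m]; simp

theorem max2_eq_max_lex (line : List (Int × Int)) :
    PySem.List.max2? line (fun x => x.1) (fun x => x.2) =
      PySem.List.max? line (fun x => toLex x) := by
  simp only [PySem.List.max2?, PySem.List.max?]
  congr 1
  funext acc x
  cases acc with
  | none => rfl
  | some m => dsimp only; rw [pvCmp_eq m x]; simp

theorem pyRange_one_length (a b : Int) : ((PySem.List.pyRange a b 1).length : Int) = max (b - a) 0 := by
  simp only [PySem.List.pyRange]
  norm_num

-- getD after a fold of additive modifies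
theorem getD_foldl_modify_add {β : Type} (l : List β) (key : β → Int × Int) (w : β → Int)
    (d : PySem.Dict (Int × Int) Int) (v : Int × Int) :
    (l.foldl (fun d b => d.modify (key b) 0 (fun x => x + w b)) d).getD v 0 =
      d.getD v 0 + (l.map (fun b => if key b = v then w b else 0)).sum := by
  induction l generalizing d with
  | nil => simp
  | cons b t ih =>
    simp only [List.foldl_cons, List.map_cons, List.sum_cons, ih, PySem.Dict.getD_modify]
    by_cases h : v = key b
    · simp [h]; ring
    · simp [h, Ne.symm h]

theorem sum_ite_count (l : List (Int × Int)) (v : Int × Int) (C : Int) :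
    (l.map (fun x => if x = v then C else 0)).sum = (l.count v : Int) * C := by
  induction l with
  | nil => simp
  | cons x t ih =>
    simp only [List.map_cons, List.sum_cons, ih, List.count_cons]
    by_cases h : x = v
    · simp [h]; ring
    · simp [h]

-- per-line weight A assigns to rank i in a line of length L
def pvW (L i : Int) : Int :=
  ((PySem.List.pyRange 0 (i - 1) 1).length : Int) + ((PySem.List.pyRange (i + 2) L 1).length : Int)

theorem pvW_eq (L i : Int) : pvW L i = max (i - 1) 0 + max (L - i - 2) 0 := by
  unfold pvW; rw [pyRange_one_length, pyRange_one_length]; omega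

theorem map_snd_fun {α : Type} (l : List α) (s : Int) (g : α → Int) :
    (PySem.List.enumerate l s).map (fun p => g p.2) = l.map g := by
  have h := congrArg (List.map g) (PySem.List.map_snd_enumerate l s)
  rwa [List.map_map] at h

theorem sumA_concat (x y : Int × Int) (mid : List (Int × Int)) (v : Int × Int) :
    ((PySem.List.enumerate (x :: (mid ++ [y])) 0).map
        (fun p => if p.2 = v then pvW ((mid.length : Int) + 2) p.1 else 0)).sum =
      (((x :: (mid ++ [y])).count v : Int)) * ((mid.length : Int) + 2 - 3)
        + (if x = v then 1 else 0) + (if y = v then 1 else 0) := by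
  rw [PySem.List.enumerate_cons, PySem.List.enumerate_append, PySem.List.enumerate_cons,
    PySem.List.enumerate_nil]
  simp only [List.map_cons, List.map_append, List.sum_cons, List.sum_append, List.map_nil,
    List.sum_nil, zero_add, add_zero]
  have hmid : (List.map (fun p => if p.2 = v then pvW ((mid.length : Int) + 2) p.1 else 0)
      (PySem.List.enumerate mid 1)).sum = ((mid.count v : Int)) * ((mid.length : Int) - 1) := by
    rw [List.map_congr_left (g := fun p : Int × (Int × Int) =>
        (fun z => if z = v then ((mid.length : Int) - 1) else 0) p.2) ?_]
    · rw [map_snd_fun mid 1 (fun z => if z = v then ((mid.length : Int) - 1) else 0),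
        sum_ite_count]
    · intro p hp
      rcases (PySem.List.mem_enumerate_iff mid 1 p).1 hp with ⟨k, hk, rfl⟩
      by_cases h : mid[k] = v
      · subst h; simp [pvW_eq]; omega
      · simp [h]
  have h0 : pvW ((mid.length : Int) + 2) 0 = (mid.length : Int) := by rw [pvW_eq]; omega
  have h1 : pvW ((mid.length : Int) + 2) (1 + (mid.length : Int)) = (mid.length : Int) := by
    rw [pvW_eq]; omega
  rw [hmid]
  simp only [h0, h1, List.count_cons, List.count_append, List.count_cons, List.count_nil]
  by_cases hx : x = v <;> by_cases hy : y = v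
  · simp [hx, hy]; ring
  · simp [hx, hy]; ring
  · simp [hx, hy]; ring
  · simp [hx, hy]; omega

theorem sumA_single (x v : Int × Int) :
    ((PySem.List.enumerate [x] 0).map (fun p => if p.2 = v then pvW 1 p.1 else 0)).sum =
      (([x].count v : Int)) * (1 - 3) + (if x = v then 1 else 0) + (if x = v then 1 else 0) := by
  by_cases h : x = v <;>
    simp [PySem.List.enumerate_cons, PySem.List.enumerate_nil, pvW_eq, h]

theorem set_update_self (s : PySem.Set (Int × Int)) (xs : List (Int × Int))
    (h : ∀ x ∈ xs, x ∈ s) : PySem.Set.update s xs = s := by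
  rw [PySem.Set.update_eq_append_filter]
  have hnil : (PySem.Set.ofList xs).filter (fun y => !s.contains y) = [] := by
    rw [List.filter_eq_nil_iff]
    intro y hy
    have : y ∈ xs := (PySem.Set.mem_ofList xs y).1 hy
    simp only [Bool.not_eq_eq_eq_not, Bool.not_true]
    rw [(PySem.Set.contains_iff s y).2 (h y this)]
    simp
  rw [hnil, List.append_nil]

theorem mem_items_update {κ ν : Type} [BEq κ] [LawfulBEq κ] (ps : List (κ × ν))
    (d : PySem.Dict κ ν) (p : κ × ν) (h : p ∈ (d.update ps).items) : p ∈ d.items ∨ p ∈ ps := by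
  induction ps generalizing d with
  | nil => exact Or.inl h
  | cons q t ih =>
    rcases ih (d.insert q.1 q.2) h with h' | h'
    · rcases (PySem.Dict.mem_items_insert _ _ _ _).1 h' with rfl | ⟨hm, _⟩
      · exact Or.inr (List.mem_cons_self)
      · exact Or.inl hm
    · exact Or.inr (List.mem_cons_of_mem _ h')

theorem min_eq_head (line : List (Int × Int)) {x : Int × Int} {t : List (Int × Int)}
    (h : PySem.List.sorted line (fun z => toLex z) = x :: t) :
    PySem.List.min? line (fun z => toLex z) = some x := by
  cases hm : PySem.List.min? line (fun z => toLex z) with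
  | none =>
    have : line = [] := (PySem.List.min?_eq_none_iff line _).1 hm
    rw [this] at h
    simp [PySem.List.sorted] at h
  | some m =>
    have hml : m ∈ line := PySem.List.min?_mem hm
    have hxl : x ∈ line := by
      have : x ∈ PySem.List.sorted line (fun z => toLex z) := by rw [h]; exact List.mem_cons_self
      exact (PySem.List.sorted_perm line (fun z => toLex z) false).mem_iff.1 this
    have h1 : toLex x ≤ toLex m := PySem.List.key_head_sorted_le line _ h m hml
    have h2 : toLex m ≤ toLex x := PySem.List.min?_isMin hm x hxl
    have : m = x := toLex.injective (le_antisymm h2 h1)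
    rw [this]

theorem max_eq_last (line : List (Int × Int)) {y : Int × Int} {mid : List (Int × Int)}
    (h : PySem.List.sorted line (fun z => toLex z) = mid ++ [y]) :
    PySem.List.max? line (fun z => toLex z) = some y := by
  cases hm : PySem.List.max? line (fun z => toLex z) with
  | none =>
    have : line = [] := (PySem.List.max?_eq_none_iff line _).1 hm
    rw [this] at h
    simp [PySem.List.sorted] at h
  | some m =>
    have hml : m ∈ line := PySem.List.max?_mem hm
    have hyl : y ∈ line := by
      have : y ∈ PySem.List.sorted line (fun z => toLex z) := by
        rw [h]; exact List.mem_append_right _ List.mem_cons_self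
      exact (PySem.List.sorted_perm line (fun z => toLex z) false).mem_iff.1 this
    have h1 : toLex y ≤ toLex m := PySem.List.max?_isMax hm y hyl
    have h2 : toLex m ≤ toLex y := by
      have hms : m ∈ PySem.List.sorted line (fun z => toLex z) :=
        (PySem.List.sorted_perm line (fun z => toLex z) false).mem_iff.2 hml
      rcases List.mem_iff_getElem.1 hms with ⟨p, hp, hpm⟩
      have hlen : (PySem.List.sorted line (fun z => toLex z)).length = mid.length + 1 := by
        rw [h]; simp
      have hq : mid.length < (PySem.List.sorted line (fun z => toLex z)).length := by omega
      have hmono := PySem.List.key_sorted_getElem_mono line (fun z => toLex z)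
        (p := p) (q := mid.length) (by omega) hq
      have hy' : (PySem.List.sorted line (fun z => toLex z))[mid.length] = y := by
        simp [h]
      rw [hpm, hy'] at hmono
      exact hmono
    have : m = y := toLex.injective (le_antisymm h2 h1)
    rw [this]

-- the per-line blocked contribution of a single value v (proof-side closed form)
def pvC (line : List (Int × Int)) (v : Int × Int) : Int :=
  (line.count v : Int) * ((line.length : Int) - 3)
  + (if PySem.List.min2? line (fun x => x.1) (fun x => x.2) = some v then 1 else 0)
  + (if PySem.List.max2? line (fun x => x.1) (fun x => x.2) = some v then 1 else 0)

-- A's per-line inner loop, read at one value v, adds pvC line v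
theorem stepA_getD (d : PySem.Dict (Int × Int) Int) (line : List (Int × Int)) (v : Int × Int) :
    ((PySem.List.enumerate (PySem.List.sorted2 line (fun x => x.1) (fun x => x.2)) 0).foldl
        (fun d p => d.modify p.2 0 (fun b => b +
          (((PySem.List.pyRange 0 (p.1 - 1) 1).length : Int) +
           ((PySem.List.pyRange (p.1 + 2) (line.length : Int) 1).length : Int)))) d).getD v 0 =
      d.getD v 0 + pvC line v := by
  rw [show ((PySem.List.enumerate (PySem.List.sorted2 line (fun z => z.1) (fun z => z.2)) 0).foldl
      (fun d p => d.modify p.2 0 (fun b => b +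
        (((PySem.List.pyRange 0 (p.1 - 1) 1).length : Int) +
         ((PySem.List.pyRange (p.1 + 2) (line.length : Int) 1).length : Int)))) d) =
    ((PySem.List.enumerate (PySem.List.sorted2 line (fun z => z.1) (fun z => z.2)) 0).foldl
      (fun d p => d.modify p.2 0 (fun b => b + pvW (line.length : Int) p.1)) d) from rfl]
  rw [getD_foldl_modify_add _ (fun p : Int × (Int × Int) => p.2)
    (fun p : Int × (Int × Int) => pvW (line.length : Int) p.1) d v]
  congr 1
  -- the enumerate-sum equals pvC line v, by the shape of sorted(line)
  have hperm : (PySem.List.sorted line (fun z => toLex z)).Perm line :=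
    PySem.List.sorted_perm line (fun z => toLex z) false
  have hcount : ∀ w, line.count w = (PySem.List.sorted line (fun z => toLex z)).count w :=
    fun w => (hperm.count_eq w).symm
  have hlen : line.length = (PySem.List.sorted line (fun z => toLex z)).length :=
    hperm.length_eq.symm
  rw [sorted2_eq_sorted_lex]
  unfold pvC
  rcases hshape : PySem.List.sorted line (fun z => toLex z) with _ | ⟨x, t⟩
  · -- line = []
    have hnil : line = [] := (PySem.List.sorted_eq_nil_iff line _ false).1 hshape
    subst hnil
    simp [PySem.List.enumerate_nil, PySem.List.min2?, PySem.List.max2?, PySem.List.sorted] at hshape ⊢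
  · have hmin : PySem.List.min2? line (fun z => z.1) (fun z => z.2) = some x := by
      rw [min2_eq_min_lex]; exact min_eq_head line hshape
    rcases List.eq_nil_or_concat t with rfl | ⟨mid, y, rfl⟩
    · -- sorted line = [x]
      have hmax : PySem.List.max2? line (fun z => z.1) (fun z => z.2) = some x := by
        rw [max2_eq_max_lex]; exact max_eq_last line (mid := []) (by simpa using hshape)
      have hl1 : (line.length : Int) = 1 := by rw [hlen, hshape]; simp
      rw [hl1, sumA_single x v, hmin, hmax, hcount v, hshape]
      by_cases h : x = v
      · subst h; simp
      · simp [h]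
    · -- sorted line = x :: mid ++ [y]
      have hmax : PySem.List.max2? line (fun z => z.1) (fun z => z.2) = some y := by
        rw [max2_eq_max_lex]
        exact max_eq_last line (mid := x :: mid) (by simpa using hshape)
      have hl2 : (line.length : Int) = (mid.length : Int) + 2 := by
        rw [hlen, hshape]; simp [List.concat_eq_append]; omega
      simp only [List.concat_eq_append] at hshape ⊢
      rw [hl2, sumA_concat x y mid v, hmin, hmax, hcount v, hshape]
      simp only [List.count_cons, List.count_append, List.count_nil, Option.some.injEq]

-- A's whole line loop, read at one value v, adds the same sum
theorem foldA_getD (lines : List (List (Int × Int))) (d : PySem.Dict (Int × Int) Int)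
    (v : Int × Int) :
    (lines.foldl (fun d line =>
      (PySem.List.enumerate (PySem.List.sorted2 line (fun x => x.1) (fun x => x.2)) 0).foldl
        (fun d p => d.modify p.2 0 (fun b => b +
          (((PySem.List.pyRange 0 (p.1 - 1) 1).length : Int) +
           ((PySem.List.pyRange (p.1 + 2) (line.length : Int) 1).length : Int)))) d) d).getD v 0 =
      d.getD v 0 + (lines.map (fun line => pvC line v)).sum := by
  induction lines generalizing d with
  | nil => simp
  | cons l t ih =>
    simp only [List.foldl_cons, List.map_cons, List.sum_cons]
    rw [ih, stepA_getD]
    ring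

-- the initial dict {a: 0 for a in asteroids} reads 0 everywhere
theorem getD_init (asteroids : List (Int × Int)) (d : PySem.Dict (Int × Int) Int)
    (v : Int × Int) (h : d.getD v 0 = 0) :
    (asteroids.foldl (fun d a => d.insert a 0) d).getD v 0 = 0 := by
  induction asteroids generalizing d with
  | nil => exact h
  | cons a t ih =>
    simp only [List.foldl_cons]
    apply ih
    rw [PySem.Dict.getD_insert]
    split_ifs <;> simp [h]

-- keys of the per-line A fold are unchanged
theorem step_keys (d : PySem.Dict (Int × Int) Int) (line : List (Int × Int))
    (hsub : ∀ v ∈ line, v ∈ d.keys) :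
    ((PySem.List.enumerate (PySem.List.sorted2 line (fun x => x.1) (fun x => x.2)) 0).foldl
        (fun d p => d.modify p.2 0 (fun b => b +
          (((PySem.List.pyRange 0 (p.1 - 1) 1).length : Int) +
           ((PySem.List.pyRange (p.1 + 2) (line.length : Int) 1).length : Int)))) d).keys
      = d.keys := by
  rw [PySem.Dict.keys_foldl_modify_key
    (PySem.List.enumerate (PySem.List.sorted2 line (fun x => x.1) (fun x => x.2)) 0)
    (fun p => p.2) 0
    (fun _ p => fun b => b + (((PySem.List.pyRange 0 (p.1 - 1) 1).length : Int) +
      ((PySem.List.pyRange (p.1 + 2) (line.length : Int) 1).length : Int))) d]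
  rw [PySem.List.map_snd_enumerate]
  apply set_update_self
  intro z hz
  exact hsub z ((PySem.List.sorted2_perm line _ _ _).mem_iff.1 hz)

theorem foldA_keys (lines : List (List (Int × Int))) (d : PySem.Dict (Int × Int) Int)
    (hsub : ∀ l ∈ lines, ∀ v ∈ l, v ∈ d.keys) :
    (lines.foldl (fun d line =>
      (PySem.List.enumerate (PySem.List.sorted2 line (fun x => x.1) (fun x => x.2)) 0).foldl
        (fun d p => d.modify p.2 0 (fun b => b +
          (((PySem.List.pyRange 0 (p.1 - 1) 1).length : Int) +
           ((PySem.List.pyRange (p.1 + 2) (line.length : Int) 1).length : Int)))) d) d).keys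
      = d.keys := by
  induction lines generalizing d with
  | nil => rfl
  | cons l t ih =>
    simp only [List.foldl_cons]
    rw [ih, step_keys d l (hsub l List.mem_cons_self)]
    intro l' hl' v hv
    rw [step_keys d l (hsub l List.mem_cons_self)]
    exact hsub l' (List.mem_cons_of_mem _ hl') v hv

-- min? commutes with mapping the key into the list
theorem min?_append_none {α : Type} (l : List α) (x : α) (f : α → Int)
    (h : PySem.List.min? l f = none) : PySem.List.min? (l ++ [x]) f = some x := by
  simp only [PySem.List.min?] at h ⊢
  rw [List.foldl_append, h, List.foldl_cons, List.foldl_nil]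

theorem min?_append_some {α : Type} (l : List α) (x : α) (f : α → Int) {m : α}
    (h : PySem.List.min? l f = some m) :
    PySem.List.min? (l ++ [x]) f = if f x < f m then some x else some m := by
  simp only [PySem.List.min?] at h ⊢
  rw [List.foldl_append, h, List.foldl_cons, List.foldl_nil]

theorem min?_map_id {α : Type} (l : List α) (f : α → Int) :
    PySem.List.min? (l.map f) (fun x => x) = (PySem.List.min? l f).map f := by
  induction l using List.reverseRecOn with
  | nil => rfl
  | append_singleton l x ih =>
    rcases hm : PySem.List.min? l f with _ | m
    · have hl : l = [] := (PySem.List.min?_eq_none_iff l f).1 hm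
      subst hl; rfl
    · have h1 : PySem.List.min? (l.map f) (fun x => x) = some (f m) := by
        rw [ih, hm, Option.map_some]
      rw [List.map_append, List.map_singleton, min?_append_some (l.map f) (f x) (fun x => x) h1,
        min?_append_some l x f hm]
      by_cases h : f x < f m <;> simp [h]

-- keys/values of B's initial dict dict.fromkeys(asteroids, 0)
theorem keys_update_pairs (l : List (Int × Int)) (d : PySem.Dict (Int × Int) Int) :
    (d.update (l.map (fun a => (a, 0)))).keys = PySem.Set.update d.keys l := by
  induction l generalizing d with
  | nil => rfl
  | cons x t ih =>
    simp only [List.map_cons]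
    have h1 : d.update ((x, 0) :: t.map (fun a => (a, 0))) =
        (d.insert x 0).update (t.map (fun a => (a, 0))) := rfl
    rw [h1, ih, PySem.Set.update_cons]
    congr 1
    by_cases hc : x ∈ d.keys
    · rw [PySem.Dict.keys_insert_of_contains, PySem.Set.add_of_mem hc]
      rw [PySem.Dict.contains_iff_mem_keys]
      exact hc
    · rw [PySem.Dict.keys_insert_of_not_contains, PySem.Set.add_of_not_mem hc]
      rw [Bool.eq_false_iff]
      intro hcon
      exact hc ((PySem.Dict.contains_iff_mem_keys d x).1 hcon)

theorem getD_update_pairs_zero (l : List (Int × Int)) (d : PySem.Dict (Int × Int) Int)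
    (v : Int × Int) (h : d.getD v 0 = 0) :
    (d.update (l.map (fun a => (a, 0)))).getD v 0 = 0 := by
  induction l generalizing d with
  | nil => exact h
  | cons x t ih =>
    simp only [List.map_cons]
    have h1 : d.update ((x, 0) :: t.map (fun a => (a, 0))) =
        (d.insert x 0).update (t.map (fun a => (a, 0))) := rfl
    rw [h1]
    apply ih
    rw [PySem.Dict.getD_insert]
    split_ifs <;> simp [h]

-- a modify at a key already present leaves the key list unchanged
theorem keys_modify_mem (d : PySem.Dict (Int × Int) Int) (z : Int × Int) (f : Int → Int)
    (hz : z ∈ d.keys) : (d.modify z 0 f).keys = d.keys := by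
  rw [PySem.Dict.keys_modify, PySem.Dict.keys_insert_of_contains]
  rw [PySem.Dict.contains_iff_mem_keys]
  exact hz

-- B's per-line body: keys unchanged
theorem stepB_keys (d : PySem.Dict (Int × Int) Int) (line : List (Int × Int))
    (hsub : ∀ v ∈ line, v ∈ d.keys) :
    (if line = [] then d
     else
      let base : Int := (line.length : Int) - 3
      let d := line.foldl (fun d v => d.modify v 0 (fun b => b + base)) d
      let d := match PySem.List.min2? line (fun x => x.1) (fun x => x.2) with
               | some m => d.modify m 0 (fun b => b + 1)
               | none => d
      match PySem.List.max2? line (fun x => x.1) (fun x => x.2) with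
      | some m => d.modify m 0 (fun b => b + 1)
      | none => d).keys = d.keys := by
  by_cases hnil : line = []
  · simp [hnil]
  · rw [if_neg hnil]
    have hk0 : (line.foldl (fun d v => d.modify v 0
        (fun b => b + ((line.length : Int) - 3))) d).keys = d.keys := by
      rw [PySem.Dict.keys_foldl_modify_key line (fun v => v) 0
        (fun _ _ => fun b => b + ((line.length : Int) - 3)) d,
        show List.map (fun v => v) line = line from List.map_id line,
        set_update_self d.keys line hsub]
    rcases hm : PySem.List.min2? line (fun x => x.1) (fun x => x.2) with _ | m
    · rw [min2_eq_min_lex] at hm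
      exact absurd ((PySem.List.min?_eq_none_iff line _).1 hm) hnil
    · have hml : m ∈ line := by
        rw [min2_eq_min_lex] at hm; exact PySem.List.min?_mem hm
      rcases hx : PySem.List.max2? line (fun x => x.1) (fun x => x.2) with _ | x
      · rw [max2_eq_max_lex] at hx
        exact absurd ((PySem.List.max?_eq_none_iff line _).1 hx) hnil
      · have hxl : x ∈ line := by
          rw [max2_eq_max_lex] at hx; exact PySem.List.max?_mem hx
        dsimp only
        rw [keys_modify_mem _ x _ (by rw [keys_modify_mem _ m _ (by rw [hk0]; exact hsub m hml), hk0]; exact hsub x hxl),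
          keys_modify_mem _ m _ (by rw [hk0]; exact hsub m hml), hk0]

theorem foldB_keys (lines : List (List (Int × Int))) (d : PySem.Dict (Int × Int) Int)
    (hsub : ∀ l ∈ lines, ∀ v ∈ l, v ∈ d.keys) :
    (lines.foldl (fun d line =>
      if line = [] then d
      else
        let base : Int := (line.length : Int) - 3
        let d := line.foldl (fun d v => d.modify v 0 (fun b => b + base)) d
        let d := match PySem.List.min2? line (fun x => x.1) (fun x => x.2) with
                 | some m => d.modify m 0 (fun b => b + 1)
                 | none => d
        match PySem.List.max2? line (fun x => x.1) (fun x => x.2) with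
        | some m => d.modify m 0 (fun b => b + 1)
        | none => d) d).keys = d.keys := by
  induction lines generalizing d with
  | nil => rfl
  | cons l t ih =>
    simp only [List.foldl_cons]
    rw [ih, stepB_keys d l (hsub l List.mem_cons_self)]
    intro l' hl' v hv
    rw [stepB_keys d l (hsub l List.mem_cons_self)]
    exact hsub l' (List.mem_cons_of_mem _ hl') v hv

-- B's per-line body, read at one value v, adds pvC line v
theorem stepB_getD (d : PySem.Dict (Int × Int) Int) (line : List (Int × Int)) (v : Int × Int) :
    (if line = [] then d
     else
      let base : Int := (line.length : Int) - 3
      let d := line.foldl (fun d v => d.modify v 0 (fun b => b + base)) d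
      let d := match PySem.List.min2? line (fun x => x.1) (fun x => x.2) with
               | some m => d.modify m 0 (fun b => b + 1)
               | none => d
      match PySem.List.max2? line (fun x => x.1) (fun x => x.2) with
      | some m => d.modify m 0 (fun b => b + 1)
      | none => d).getD v 0 = d.getD v 0 + pvC line v := by
  by_cases hnil : line = []
  · subst hnil
    simp [pvC, PySem.List.min2?, PySem.List.max2?]
  · rw [if_neg hnil]
    rcases hm : PySem.List.min2? line (fun x => x.1) (fun x => x.2) with _ | m
    · rw [min2_eq_min_lex] at hm
      exact absurd ((PySem.List.min?_eq_none_iff line _).1 hm) hnil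
    · rcases hx : PySem.List.max2? line (fun x => x.1) (fun x => x.2) with _ | x
      · rw [max2_eq_max_lex] at hx
        exact absurd ((PySem.List.max?_eq_none_iff line _).1 hx) hnil
      · dsimp only
        simp only [PySem.Dict.getD_modify]
        have hfold : ∀ w, (line.foldl (fun d v => d.modify v 0
            (fun b => b + ((line.length : Int) - 3))) d).getD w 0 =
            d.getD w 0 + (line.count w : Int) * ((line.length : Int) - 3) := fun w => by
          rw [getD_foldl_modify_add line (fun z : Int × Int => z)
            (fun _ => (line.length : Int) - 3) d w, sum_ite_count]
        simp only [hfold]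
        unfold pvC
        rw [hm, hx]
        simp only [Option.some.injEq]
        by_cases h1 : v = m <;> by_cases h2 : v = x
        · subst h1; subst h2; simp; try ring
        · subst h1; simp [h2, Ne.symm h2]; try ring
        · subst h2; simp [h1, Ne.symm h1]; try ring
        · simp [h1, h2, Ne.symm h1, Ne.symm h2]; try ring

theorem foldB_getD (lines : List (List (Int × Int))) (d : PySem.Dict (Int × Int) Int)
    (v : Int × Int) :
    (lines.foldl (fun d line =>
      if line = [] then d
      else
        let base : Int := (line.length : Int) - 3
        let d := line.foldl (fun d v => d.modify v 0 (fun b => b + base)) d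
        let d := match PySem.List.min2? line (fun x => x.1) (fun x => x.2) with
                 | some m => d.modify m 0 (fun b => b + 1)
                 | none => d
        match PySem.List.max2? line (fun x => x.1) (fun x => x.2) with
        | some m => d.modify m 0 (fun b => b + 1)
        | none => d) d).getD v 0 = d.getD v 0 + (lines.map (fun line => pvC line v)).sum := by
  induction lines generalizing d with
  | nil => simp
  | cons l t ih =>
    simp only [List.foldl_cons, List.map_cons, List.sum_cons]
    rw [ih, stepB_getD]
    ring

-- B's best-scan over (key, value) pairs is min? over the keys
theorem scanItems_eq (l : List (Int × Int)) (F : (Int × Int) → Int) :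
    (l.map (fun k => (k, F k))).foldl pvBestStep none =
    (PySem.List.min? l F).map (fun m => (F m, m)) := by
  induction l using List.reverseRecOn with
  | nil => rfl
  | append_singleton l a ih =>
    rw [List.map_append, List.map_singleton, List.foldl_append, ih,
      List.foldl_cons, List.foldl_nil]
    rcases hm : PySem.List.min? l F with _ | m
    · rw [min?_append_none l a F hm]
      rfl
    · rw [min?_append_some l a F hm, Option.map_some]
      by_cases h : F a < F m <;> simp [pvBestStep, h]

-- ===== VERDICT (by name: the statement is the Claim_ definition above) =====
theorem get_station_spec : Claim_equal_get_station := by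
  intro asteroids colinear _hdom hpre
  unfold Spec_get_station
  unfold get_station get_station_alt
  dsimp only
  rcases hpre with ⟨hne, hmem⟩
  set lines := (PySem.Dict.ofList (colinear.map (fun p => ((p.1, p.2.1), p.2.2)))).values with hlines
  set d0 : PySem.Dict (Int × Int) Int :=
    asteroids.foldl (fun d a => d.insert a 0) PySem.Dict.empty with hd0
  set e0 : PySem.Dict (Int × Int) Int :=
    PySem.Dict.ofList ((PySem.List.dedup asteroids).map (fun a => (a, 0))) with he0
  -- keys and values of the two initial dicts
  have hkeys0 : d0.keys = PySem.Set.ofList asteroids := by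
    rw [hd0, PySem.Dict.keys_foldl_insert asteroids (fun _ _ => 0) PySem.Dict.empty,
      PySem.Dict.keys_empty, PySem.Set.update_nil_left]
  have hnd0 : d0.keys.Nodup :=
    PySem.Dict.nodup_keys_foldl_insert asteroids (fun _ _ => 0) PySem.Dict.empty
      PySem.Dict.nodup_keys_empty
  have hgd0 : ∀ v, d0.getD v 0 = 0 := fun v =>
    getD_init asteroids PySem.Dict.empty v rfl
  have hkeyse0 : e0.keys = PySem.Set.ofList asteroids := by
    rw [he0, show PySem.Dict.ofList ((PySem.List.dedup asteroids).map (fun a => (a, 0))) =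
        (PySem.Dict.empty : PySem.Dict (Int × Int) Int).update
          ((PySem.List.dedup asteroids).map (fun a => (a, 0))) from rfl,
      keys_update_pairs, PySem.Dict.keys_empty, PySem.Set.update_nil_left,
      PySem.List.dedup_eq_ofList, PySem.Set.ofList_ofList]
  have hnde0 : e0.keys.Nodup := by
    rw [hkeyse0]; exact PySem.Set.nodup_ofList asteroids
  have hgde0 : ∀ v, e0.getD v 0 = 0 := fun v => by
    rw [he0, show PySem.Dict.ofList ((PySem.List.dedup asteroids).map (fun a => (a, 0))) =
        (PySem.Dict.empty : PySem.Dict (Int × Int) Int).update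
          ((PySem.List.dedup asteroids).map (fun a => (a, 0))) from rfl]
    exact getD_update_pairs_zero (PySem.List.dedup asteroids) PySem.Dict.empty v rfl
  -- all line members are asteroids (Pre_), so keys never change
  have hsub : ∀ l ∈ lines, ∀ v ∈ l, v ∈ PySem.Set.ofList asteroids := by
    intro l hl v hv
    rw [PySem.Set.mem_ofList]
    rcases List.mem_map.1 hl with ⟨pr, hpr, rfl⟩
    have hpr' : pr ∈ ((PySem.Dict.empty :
        PySem.Dict (Int × Int) (List (Int × Int))).update
        (colinear.map (fun p => ((p.1, p.2.1), p.2.2)))).items := hpr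
    rcases mem_items_update (colinear.map (fun p => ((p.1, p.2.1), p.2.2))) PySem.Dict.empty
      pr hpr' with h' | h'
    · simp [PySem.Dict.empty] at h'
    · rcases List.mem_map.1 h' with ⟨q, hq, rfl⟩
      exact hmem q hq v hv
  set dA := lines.foldl (fun d line =>
      (PySem.List.enumerate (PySem.List.sorted2 line (fun x => x.1) (fun x => x.2)) 0).foldl
        (fun d p => d.modify p.2 0 (fun b => b +
          (((PySem.List.pyRange 0 (p.1 - 1) 1).length : Int) +
           ((PySem.List.pyRange (p.1 + 2) (line.length : Int) 1).length : Int)))) d) d0 with hdA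
  set dB := lines.foldl (fun d line =>
      if line = [] then d
      else
        let base : Int := (line.length : Int) - 3
        let d := line.foldl (fun d v => d.modify v 0 (fun b => b + base)) d
        let d := match PySem.List.min2? line (fun x => x.1) (fun x => x.2) with
                 | some m => d.modify m 0 (fun b => b + 1)
                 | none => d
        match PySem.List.max2? line (fun x => x.1) (fun x => x.2) with
        | some m => d.modify m 0 (fun b => b + 1)
        | none => d) e0 with hdB
  have hkeysA : dA.keys = PySem.Set.ofList asteroids := by
    rw [hdA, foldA_keys lines d0 (by rw [hkeys0]; exact hsub), hkeys0]
  have hndA : dA.keys.Nodup := by rw [hkeysA]; exact PySem.Set.nodup_ofList asteroids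
  have hkeysB : dB.keys = PySem.Set.ofList asteroids := by
    rw [hdB, foldB_keys lines e0 (by rw [hkeyse0]; exact hsub), hkeyse0]
  have hndB : dB.keys.Nodup := by rw [hkeysB]; exact PySem.Set.nodup_ofList asteroids
  -- every lookup in either final dict is the same sum of per-line contributions
  have hvalA : ∀ v, dA.getD v 0 = (lines.map (fun line => pvC line v)).sum := by
    intro v
    rw [hdA, foldA_getD, hgd0 v, zero_add]
  have hvalB : ∀ v, dB.getD v 0 = (lines.map (fun line => pvC line v)).sum := by
    intro v
    rw [hdB, foldB_getD, hgde0 v, zero_add]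
  have hBA : ∀ v, dB.getD v 0 = dA.getD v 0 := fun v => by rw [hvalA v, hvalB v]
  -- B's scan input: the items of dB, which are (k, dA.getD k 0) over the shared key list
  have hitems : dB.items = (PySem.Set.ofList asteroids).map (fun k => (k, dA.getD k 0)) := by
    rw [PySem.Dict.items_eq_map_keys dB hndB 0, hkeysB]
    exact List.map_congr_left (fun k _ => by rw [hBA k])
  -- A's two extremal passes
  have hvalues : dA.values = dA.keys.map (fun k => dA.getD k 0) :=
    PySem.Dict.values_eq_map_keys dA hndA 0
  rcases hmA : PySem.List.min? (PySem.Set.ofList asteroids) (fun x => dA.getD x 0) with _ | m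
  · exfalso
    have h0 : PySem.Set.ofList asteroids = [] :=
      (PySem.List.min?_eq_none_iff _ _).1 hmA
    rcases List.exists_mem_of_ne_nil asteroids hne with ⟨a, ha⟩
    have : a ∈ PySem.Set.ofList asteroids := (PySem.Set.mem_ofList asteroids a).2 ha
    rw [h0] at this
    exact List.not_mem_nil this
  · have hminv : PySem.List.min? dA.values (fun x => x) = some (dA.getD m 0) := by
      rw [hvalues, min?_map_id, hkeysA, hmA, Option.map_some]
    have hstat : PySem.List.min? dA.keys (fun x => dA.getD x 0) = some m := by
      rw [hkeysA, hmA]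
    rw [hitems, scanItems_eq, hmA, hminv, hstat]
    rfl
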